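-- pv_equiv track=rewrite | github.com/LucasRxTx/hdlc-parsing | python_implementation/data_frame.py | __filter_moves_that_repeat_three_times_in_a_row
-- ===== SOURCE A (Python) =====
-- import typing
--
-- moves_t = typing.NewType("moves_t", list[int])
--
-- def __filter_moves_that_repeat_three_times_in_a_row(moves: moves_t) -> moves_t:
--     out_moves = []
--
--     # buffer all moves into same_moves, and move them into out_moves when a
--     # different move is found, or throw them away if they exceed 3 times in a row.
--     moves_count = len(moves)
--     for i, move in enumerate(moves):
--         if i < moves_count - 2 and move == moves[i + 1] and move == moves[i + 2]:
--             continue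
--
--         out_moves.append(move)
--
--
--
--     return out_moves
-- ===== SOURCE B (Python) =====
-- def __filter_moves_that_repeat_three_times_in_a_row(moves):
--     # Keep at most the first 2 elements of each maximal run of equal values,
--     # tracked with a running count instead of a two-ahead index lookahead.
--     out_moves = []
--     run = 0
--     prev = None
--     for move in moves:
--         if run > 0 and move == prev:
--             run += 1
--         else:
--             run = 1
--         prev = move
--         if run <= 2:
--             out_moves.append(move)
--     return out_moves
-- ===== Notes on version B (the rewrite author's own statement) =====
-- stated objective: simpler
-- what changed: Replaces the per-index two-ahead lookahead (enumerate + moves[i+1]/moves[i+2]) with a single forward pass keeping a run counter and previous value, appending an element only while its run length is at most 2.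
import Mathlib
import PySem

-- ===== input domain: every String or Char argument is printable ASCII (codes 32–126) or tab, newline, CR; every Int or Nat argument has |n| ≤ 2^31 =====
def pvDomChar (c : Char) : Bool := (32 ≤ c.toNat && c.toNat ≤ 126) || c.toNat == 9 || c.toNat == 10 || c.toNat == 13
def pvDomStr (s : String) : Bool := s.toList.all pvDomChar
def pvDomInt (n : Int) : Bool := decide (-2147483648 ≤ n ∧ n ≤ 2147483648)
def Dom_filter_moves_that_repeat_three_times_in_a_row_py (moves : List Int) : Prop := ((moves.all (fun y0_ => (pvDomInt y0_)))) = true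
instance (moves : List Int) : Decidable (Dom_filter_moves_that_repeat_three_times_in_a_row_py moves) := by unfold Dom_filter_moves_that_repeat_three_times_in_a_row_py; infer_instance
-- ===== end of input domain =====

-- B replaces A's two-ahead index lookahead with a one-pass run counter; objective: simpler.

-- ===== PORT A =====
def filter_moves_that_repeat_three_times_in_a_row_py (moves : List Int) : List Int :=
  let moves_count : Int := (moves.length : Int)
  (PySem.List.enumerate moves 0).foldl
    (fun out_moves p =>
      if p.1 < moves_count - 2 ∧
         PySem.List.pyGet? moves (p.1 + 1) = some p.2 ∧
         PySem.List.pyGet? moves (p.1 + 2) = some p.2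
      then out_moves
      else out_moves ++ [p.2]) []

-- ===== PORT B =====
def filter_moves_that_repeat_three_times_in_a_row_py_alt (moves : List Int) : List Int :=
  (moves.foldl
    (fun (st : List Int × Int × Option Int) move =>
      let run : Int := if 0 < st.2.1 ∧ some move = st.2.2 then st.2.1 + 1 else 1
      ((if run ≤ 2 then st.1 ++ [move] else st.1), run, some move))
    ([], 0, none)).1

-- ===== PRECONDITION & SPEC =====
def Spec_filter_moves_that_repeat_three_times_in_a_row_py (moves : List Int) (out : List Int) : Prop := out = filter_moves_that_repeat_three_times_in_a_row_py_alt moves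
instance (moves : List Int) (out : List Int) : Decidable (Spec_filter_moves_that_repeat_three_times_in_a_row_py moves out) := by unfold Spec_filter_moves_that_repeat_three_times_in_a_row_py; infer_instance

-- ===== CLAIM (what is proved, stated in full; the proofs are below) =====
def Claim_equal_filter_moves_that_repeat_three_times_in_a_row_py : Prop := ∀ (moves : List Int), Dom_filter_moves_that_repeat_three_times_in_a_row_py moves → Spec_filter_moves_that_repeat_three_times_in_a_row_py moves (filter_moves_that_repeat_three_times_in_a_row_py moves)

-- ===== LEMMAS AND PROOFS =====

-- Structural characterisation of A: each element is dropped iff the next two equal it.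
def arec : List Int → List Int
  | [] => []
  | [a] => [a]
  | [a, b] => [a, b]
  | a :: b :: c :: t => (if a = b ∧ a = c then [] else [a]) ++ arec (b :: c :: t)

-- Structural characterisation of B's loop after the first element: prev value and current run length.
def brec (prev : Int) (run : Int) : List Int → List Int
  | [] => []
  | m :: l =>
      if 0 < run ∧ m = prev then
        (if run + 1 ≤ 2 then [m] else []) ++ brec m (run + 1) l
      else
        [m] ++ brec m 1 l

lemma A_fold : ∀ (suf pre acc : List Int),
    (PySem.List.enumerate suf (pre.length : Int)).foldl
      (fun out_moves p =>
        if p.1 < ((pre ++ suf).length : Int) - 2 ∧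
           PySem.List.pyGet? (pre ++ suf) (p.1 + 1) = some p.2 ∧
           PySem.List.pyGet? (pre ++ suf) (p.1 + 2) = some p.2
        then out_moves
        else out_moves ++ [p.2]) acc
      = acc ++ arec suf := by
  intro suf
  induction suf with
  | nil => intro pre acc; simp [PySem.List.enumerate, arec]
  | cons m t ih =>
    intro pre acc
    rw [PySem.List.enumerate_cons, List.foldl_cons]
    have hshift : ∀ (j : Nat), PySem.List.pyGet? (pre ++ m :: t) ((pre.length : Int) + (j : Int))
        = (m :: t)[j]? := by
      intro j
      have : ((pre.length : Int) + (j : Int)) = ((pre.length + j : Nat) : Int) := by push_cast; ring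
      rw [this, PySem.List.pyGet?_natCast, List.getElem?_append_right (by omega)]
      simp
    have h1 : PySem.List.pyGet? (pre ++ m :: t) ((pre.length : Int) + 1) = t[0]? := by
      have := hshift 1; simpa using this
    have h2 : PySem.List.pyGet? (pre ++ m :: t) ((pre.length : Int) + 2) = t[1]? := by
      have := hshift 2; simpa using this
    have hrest : ∀ acc', (PySem.List.enumerate t ((pre.length : Int) + 1)).foldl
        (fun out_moves p =>
          if p.1 < ((pre ++ m :: t).length : Int) - 2 ∧
             PySem.List.pyGet? (pre ++ m :: t) (p.1 + 1) = some p.2 ∧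
             PySem.List.pyGet? (pre ++ m :: t) (p.1 + 2) = some p.2
          then out_moves
          else out_moves ++ [p.2]) acc' = acc' ++ arec t := by
      intro acc'
      have hl : ((pre.length : Int) + 1) = (((pre ++ [m]).length : Nat) : Int) := by
        simp
      have happ : pre ++ m :: t = (pre ++ [m]) ++ t := by simp
      rw [hl]
      conv_lhs => rw [happ]
      exact ih (pre ++ [m]) acc'
    by_cases hc : (pre.length : Int) < ((pre ++ m :: t).length : Int) - 2 ∧
        PySem.List.pyGet? (pre ++ m :: t) ((pre.length : Int) + 1) = some m ∧
        PySem.List.pyGet? (pre ++ m :: t) ((pre.length : Int) + 2) = some m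
    · -- skipped: next two equal m, so t = m :: m :: _
      rw [if_pos hc, hrest acc]
      obtain ⟨hlen, hg1, hg2⟩ := hc
      rw [h1] at hg1; rw [h2] at hg2
      cases t with
      | nil => simp at hg1
      | cons b t2 =>
        cases t2 with
        | nil => simp at hg2
        | cons c t' =>
          simp at hg1 hg2
          subst hg1; subst hg2
          simp [arec]
    · rw [if_neg hc, hrest (acc ++ [m])]
      rw [h1, h2] at hc
      cases t with
      | nil => simp [arec]
      | cons b t2 =>
        cases t2 with
        | nil => simp [arec]
        | cons c t' =>
          have hnot : ¬ (m = b ∧ m = c) := by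
            rintro ⟨e1, e2⟩
            refine hc ⟨?_, by simp [e1.symm], by simp [e2.symm]⟩
            simp; omega
          simp [arec, if_neg hnot]

lemma A_eq_arec (moves : List Int) :
    filter_moves_that_repeat_three_times_in_a_row_py moves = arec moves := by
  have := A_fold moves [] []
  simpa [filter_moves_that_repeat_three_times_in_a_row_py] using this

lemma B_fold : ∀ (l out : List Int) (a : Int) (r : Int), 0 < r →
    ((l.foldl
      (fun (st : List Int × Int × Option Int) move =>
        ((if (if 0 < st.2.1 ∧ some move = st.2.2 then st.2.1 + 1 else 1) ≤ 2 then st.1 ++ [move] else st.1),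
         (if 0 < st.2.1 ∧ some move = st.2.2 then st.2.1 + 1 else 1), some move))
      (out, r, some a)).1) = out ++ brec a r l := by
  intro l
  induction l with
  | nil => intro out a r hr; simp [brec]
  | cons m t ih =>
    intro out a r hr
    simp only [List.foldl_cons]
    by_cases hm : m = a
    · subst hm
      rw [show (if (0:Int) < r ∧ some m = some m then r + 1 else 1) = r + 1 from if_pos ⟨hr, rfl⟩]
      rw [brec, if_pos (⟨hr, rfl⟩ : (0:Int) < r ∧ m = m)]
      by_cases h2 : r + 1 ≤ 2
      · rw [if_pos h2, if_pos h2, ih (out ++ [m]) m (r+1) (by omega)]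
        simp
      · rw [if_neg h2, if_neg h2, ih out m (r+1) (by omega)]
        simp
    · rw [show (if (0:Int) < r ∧ some m = some a then r + 1 else 1) = 1 from if_neg (by simp [hm])]
      rw [show (if (1:Int) ≤ 2 then out ++ [m] else out) = out ++ [m] from if_pos (by norm_num)]
      rw [ih (out ++ [m]) m 1 (by norm_num)]
      rw [brec, if_neg (show ¬ ((0:Int) < r ∧ m = a) by tauto)]
      simp

lemma B_eq_brec (moves : List Int) :
    filter_moves_that_repeat_three_times_in_a_row_py_alt moves =
      match moves with
      | [] => []
      | a :: t => a :: brec a 1 t := by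
  cases moves with
  | nil => simp [filter_moves_that_repeat_three_times_in_a_row_py_alt]
  | cons a t =>
    unfold filter_moves_that_repeat_three_times_in_a_row_py_alt
    simp only [List.foldl_cons]
    rw [show (if (0:Int) < 0 ∧ some a = (none : Option Int) then (0:Int) + 1 else 1) = 1 from if_neg (by simp)]
    rw [show (if (1:Int) ≤ 2 then ([] : List Int) ++ [a] else []) = [a] from by norm_num]
    rw [B_fold t [a] a 1 (by norm_num)]
    simp

-- run length ≥ 2 behaves identically for all larger counters
lemma brec_ge2 : ∀ (t : List Int) (a : Int) (r s : Int), 2 ≤ r → 2 ≤ s →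
    brec a r t = brec a s t := by
  intro t
  induction t with
  | nil => intro a r s _ _; simp [brec]
  | cons m t ih =>
    intro a r s hr hs
    by_cases hm : m = a
    · rw [brec, brec, if_pos (⟨by omega, hm⟩ : (0:Int) < r ∧ m = a),
        if_pos (⟨by omega, hm⟩ : (0:Int) < s ∧ m = a),
        if_neg (by omega : ¬ r + 1 ≤ 2), if_neg (by omega : ¬ s + 1 ≤ 2)]
      simpa using ih m (r+1) (s+1) (by omega) (by omega)
    · rw [brec, brec, if_neg (show ¬ ((0:Int) < r ∧ m = a) from fun h => hm h.2),
        if_neg (show ¬ ((0:Int) < s ∧ m = a) from fun h => hm h.2)]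

lemma arec_brec : ∀ (n : Nat) (l : List Int), l.length ≤ n → ∀ a : Int,
    (arec (a :: l) = a :: brec a 1 l) ∧ (arec (a :: a :: l) = a :: a :: brec a 2 l) := by
  intro n
  induction n with
  | zero =>
    intro l hl a
    have : l = [] := List.eq_nil_of_length_eq_zero (by omega)
    subst this
    constructor <;> simp [arec, brec]
  | succ n ih =>
    intro l hl a
    have h1 : ∀ (l' : List Int), l'.length ≤ n + 1 → ∀ b : Int,
        arec (b :: l') = b :: brec b 1 l' := by
      intro l' hl' b
      match l' with
      | [] => simp [arec, brec]
      | [c] =>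
        by_cases hc : c = b <;> simp [arec, brec, hc]
      | c :: d :: t =>
        by_cases hc : c = b
        · subst hc
          have h2' := (ih (d :: t) (by simp at hl' ⊢; omega) c).2
          rw [brec, if_pos (⟨by norm_num, rfl⟩ : (0:Int) < 1 ∧ c = c),
            if_pos (by norm_num : (1:Int) + 1 ≤ 2)]
          rw [h2']
          simp
        · have h1' := (ih (d :: t) (by simp at hl' ⊢; omega) c).1
          have hR : brec b 1 (c :: d :: t) = c :: brec c 1 (d :: t) := by
            rw [brec, if_neg (show ¬ ((0:Int) < 1 ∧ c = b) by tauto)]; simp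
          simp only [arec, if_neg (show ¬ (b = c ∧ b = d) by tauto), List.singleton_append]
          rw [hR, h1']
    refine ⟨h1 l hl a, ?_⟩
    match l with
    | [] => simp [arec, brec]
    | b :: t =>
      by_cases hb : b = a
      · subst hb
        have h2' := (ih t (by simp at hl ⊢; omega) b).2
        have hskip : brec b 2 (b :: t) = brec b 2 t := by
          rw [brec, if_pos (⟨by norm_num, rfl⟩ : (0:Int) < 2 ∧ b = b),
            if_neg (by norm_num : ¬ (2:Int) + 1 ≤ 2)]
          simpa using brec_ge2 t b 3 2 (by norm_num) (by norm_num)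
        have hL : arec (b :: b :: b :: t) = arec (b :: b :: t) := by
          simp [arec]
        rw [hL, h2', hskip]
      · have h1' := h1 (b :: t) hl a
        have hA : arec (a :: a :: b :: t) = [a] ++ arec (a :: b :: t) := by
          have hba : a ≠ b := fun h => hb h.symm
          simp [arec, hba]
        have hR1 : brec a 1 (b :: t) = b :: brec b 1 t := by
          rw [brec, if_neg (show ¬ ((0:Int) < 1 ∧ b = a) by tauto)]; simp
        have hR2 : brec a 2 (b :: t) = b :: brec b 1 t := by
          rw [brec, if_neg (show ¬ ((0:Int) < 2 ∧ b = a) by tauto)]; simp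
        rw [hA, h1', hR1, hR2]
        simp

-- ===== VERDICT (by name: the statement is the Claim_ definition above) =====
theorem filter_moves_that_repeat_three_times_in_a_row_py_spec : Claim_equal_filter_moves_that_repeat_three_times_in_a_row_py := by
  intro moves _
  unfold Spec_filter_moves_that_repeat_three_times_in_a_row_py
  rw [A_eq_arec, B_eq_brec]
  cases moves with
  | nil => simp [arec]
  | cons a t => exact (arec_brec t.length t le_rfl a).1
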